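-- pv_equiv track=rewrite | github.com/lnalkman/operation_research_course_work | graph_partitioning/utils.py | get_sequential_partitioning
-- ===== SOURCE A (Python) =====
-- from typing import (
--     Optional,
--     Tuple,
--     Iterable,
--     Any,
--     Set
-- )
--
-- def get_sequential_partitioning(nodes_count: int) -> Tuple[Set[int], ...]:
--     """
--     Return tuple with 3 graph partitions, every graph node sequentially
--     distributed on partitions (first partition will have first nodes, second
--     partition will have nodes after first partition...)
--     """
--     avg_nodes_per_partition, rest_nodes = (nodes_count // 3, nodes_count % 3)
--
--     if rest_nodes:
--         first_partition = (0, avg_nodes_per_partition + 1)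
--     else:
--         first_partition = (0, avg_nodes_per_partition)
--
--     if rest_nodes == 2:
--         second_partition = (
--             first_partition[1],
--             first_partition[1] + avg_nodes_per_partition + 1
--         )
--     else:
--         second_partition = (
--             first_partition[1],
--             first_partition[1] + avg_nodes_per_partition
--         )
--
--     third_partition = (
--         second_partition[1],
--         second_partition[1] + avg_nodes_per_partition
--     )
--
--     return (
--         set(i + 1 for i in range(*first_partition)),
--         set(i + 1 for i in range(*second_partition)),
--         set(i + 1 for i in range(*third_partition))
--     )
-- ===== SOURCE B (Python) =====
-- def get_sequential_partitioning(nodes_count):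
--     """Classify each node by a closed-form partition index instead of
--     materialising explicit block ranges: the node at 0-based position j
--     belongs to partition j // (q+1) while j lies among the first r*(q+1)
--     positions (the r oversized partitions), else r + (j - r*(q+1)) // q."""
--     q, r = divmod(nodes_count, 3)
--     cut = r * (q + 1)
--
--     def part(j):
--         return j // (q + 1) if j < cut else r + (j - cut) // q
--
--     return tuple({j + 1 for j in range(nodes_count) if part(j) == k}
--                  for k in range(3))
-- ===== Notes on version B (the rewrite author's own statement) =====
-- stated objective: alternative
-- what changed: Instead of computing three explicit (start, stop) block boundary pairs via remainder branches and materialising each block as a range, B classifies every node individually by a closed-form partition-index function (j//(q+1) in the oversized prefix, r+(j-cut)//q after it) and builds each partition as a filtered comprehension over all nodes.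
import Mathlib
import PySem

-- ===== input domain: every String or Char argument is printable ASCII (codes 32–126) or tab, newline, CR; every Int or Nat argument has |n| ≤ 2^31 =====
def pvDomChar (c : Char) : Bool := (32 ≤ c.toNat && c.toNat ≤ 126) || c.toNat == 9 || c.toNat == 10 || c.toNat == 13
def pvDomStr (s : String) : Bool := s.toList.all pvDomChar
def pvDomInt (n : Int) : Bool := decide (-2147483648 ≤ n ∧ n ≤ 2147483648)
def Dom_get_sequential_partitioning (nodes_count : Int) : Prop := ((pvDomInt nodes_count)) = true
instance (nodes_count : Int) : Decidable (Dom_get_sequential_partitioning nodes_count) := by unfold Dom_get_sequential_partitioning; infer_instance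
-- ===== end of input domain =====

-- B classifies each node by a closed-form partition-index function instead of
-- materialising A's branch-computed boundary ranges (objective: alternative).

-- ===== PORT A =====
def get_sequential_partitioning (nodes_count : Int) : List (List Int) :=
  let avg_nodes_per_partition := PySem.Int.floordiv nodes_count 3
  let rest_nodes := PySem.Int.mod nodes_count 3
  let first_partition : Int × Int :=
    if rest_nodes ≠ 0 then (0, avg_nodes_per_partition + 1)
    else (0, avg_nodes_per_partition)
  let second_partition : Int × Int :=
    if rest_nodes = 2 then (first_partition.2, first_partition.2 + avg_nodes_per_partition + 1)
    else (first_partition.2, first_partition.2 + avg_nodes_per_partition)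
  let third_partition : Int × Int :=
    (second_partition.2, second_partition.2 + avg_nodes_per_partition)
  [ PySem.Set.ofList ((PySem.List.pyRange first_partition.1 first_partition.2 1).map (· + 1)),
    PySem.Set.ofList ((PySem.List.pyRange second_partition.1 second_partition.2 1).map (· + 1)),
    PySem.Set.ofList ((PySem.List.pyRange third_partition.1 third_partition.2 1).map (· + 1)) ]

-- ===== PORT B =====
-- helper 'part' of Source B (closed over q, r, cut there; explicit parameters here)
def pvPart (q r cut j : Int) : Int :=
  if j < cut then PySem.Int.floordiv j (q + 1)
  else r + PySem.Int.floordiv (j - cut) q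

def get_sequential_partitioning_alt (nodes_count : Int) : List (List Int) :=
  let q := PySem.Int.floordiv nodes_count 3
  let r := PySem.Int.mod nodes_count 3
  let cut := r * (q + 1)
  (PySem.List.pyRange 0 3 1).map (fun k =>
    PySem.Set.ofList (((PySem.List.pyRange 0 nodes_count 1).filter
      (fun j => pvPart q r cut j == k)).map (· + 1)))

-- ===== PRECONDITION & SPEC =====
def Spec_get_sequential_partitioning (nodes_count : Int) (out : List (List Int)) : Prop := out = get_sequential_partitioning_alt nodes_count
instance (nodes_count : Int) (out : List (List Int)) : Decidable (Spec_get_sequential_partitioning nodes_count out) := by unfold Spec_get_sequential_partitioning; infer_instance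

-- ===== CLAIM (what is proved, stated in full; the proofs are below) =====
def Claim_equal_get_sequential_partitioning : Prop := ∀ (nodes_count : Int), Dom_get_sequential_partitioning nodes_count → Spec_get_sequential_partitioning nodes_count (get_sequential_partitioning nodes_count)

-- ===== LEMMAS AND PROOFS =====

-- floordiv with a positive divisor takes the value k on [k*b, k*b + b)
theorem pv_fd_val (a b k : Int) (hb : 0 < b) (h1 : k * b ≤ a) (h2 : a < k * b + b) :
    PySem.Int.floordiv a b = k :=
  (PySem.Int.floordiv_eq_iff_of_pos hb).2 ⟨h1, by rw [add_mul, one_mul]; exact h2⟩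

-- filtering a range keeps exactly the middle of a three-way split
theorem pv_filter_range_middle (p : Int → Bool) (a m1 m2 b : Int)
    (h1 : a ≤ m1) (h2 : m1 ≤ m2) (h3 : m2 ≤ b)
    (hL : ∀ j, a ≤ j → j < m1 → p j = false)
    (hM : ∀ j, m1 ≤ j → j < m2 → p j = true)
    (hR : ∀ j, m2 ≤ j → j < b → p j = false) :
    (PySem.List.pyRange a b 1).filter p = PySem.List.pyRange m1 m2 1 := by
  rw [PySem.List.pyRange_one_append a m1 b h1 (le_trans h2 h3),
      PySem.List.pyRange_one_append m1 m2 b h2 h3,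
      List.filter_append, List.filter_append]
  have eL : (PySem.List.pyRange a m1 1).filter p = [] := by
    apply List.filter_eq_nil_iff.2
    intro j hj
    rcases (PySem.List.mem_pyRange_one).1 hj with ⟨hja, hjb⟩
    simp [hL j hja hjb]
  have eM : (PySem.List.pyRange m1 m2 1).filter p = PySem.List.pyRange m1 m2 1 := by
    apply List.filter_eq_self.2
    intro j hj
    rcases (PySem.List.mem_pyRange_one).1 hj with ⟨hja, hjb⟩
    simp [hM j hja hjb]
  have eR : (PySem.List.pyRange m2 b 1).filter p = [] := by
    apply List.filter_eq_nil_iff.2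
    intro j hj
    rcases (PySem.List.mem_pyRange_one).1 hj with ⟨hja, hjb⟩
    simp [hR j hja hjb]
  rw [eL, eM, eR, List.nil_append, List.append_nil]

-- a 0/1/2-valued classifier splits the filtered range into the three blocks
theorem pv_filter_of_classify (P : Int → Int) (b1 b2 n : Int)
    (h0 : 0 ≤ b1) (h1 : b1 ≤ b2) (h2 : b2 ≤ n)
    (hP : ∀ j, 0 ≤ j → j < n → P j = if j < b1 then 0 else if j < b2 then 1 else 2) :
    ((PySem.List.pyRange 0 n 1).filter (fun j => P j == 0) = PySem.List.pyRange 0 b1 1)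
    ∧ ((PySem.List.pyRange 0 n 1).filter (fun j => P j == 1) = PySem.List.pyRange b1 b2 1)
    ∧ ((PySem.List.pyRange 0 n 1).filter (fun j => P j == 2) = PySem.List.pyRange b2 n 1) := by
  refine ⟨pv_filter_range_middle _ 0 0 b1 n le_rfl h0 (le_trans h1 h2) ?_ ?_ ?_,
          pv_filter_range_middle _ 0 b1 b2 n h0 h1 h2 ?_ ?_ ?_,
          pv_filter_range_middle _ 0 b2 n n (le_trans h0 h1) h2 le_rfl ?_ ?_ ?_⟩ <;>
    (intro j hj1 hj2; simp only [hP j (by omega) (by omega)]; split_ifs <;> first | rfl | omega)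

theorem get_sequential_partitioning_spec : Claim_equal_get_sequential_partitioning := by
  intro n _
  unfold Spec_get_sequential_partitioning
  simp only [get_sequential_partitioning, get_sequential_partitioning_alt]
  rw [PySem.Int.floordiv_eq_ediv_of_pos (show (0:Int) < 3 by norm_num),
      PySem.Int.mod_eq_emod_of_pos (show (0:Int) < 3 by norm_num)]
  set q := n / 3 with hq
  set r := n % 3 with hrr
  have hnq : n = 3 * q + r := by omega
  have hrc : r = 0 ∨ r = 1 ∨ r = 2 := by omega
  rw [show PySem.List.pyRange 0 3 1 = [0, 1, 2] from by decide]
  simp only [List.map_cons, List.map_nil]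
  rcases hrc with h | h | h <;> rw [h] <;> norm_num
  -- r = 0
  · by_cases hq0 : 0 ≤ q
    · rw [show n = q + q + q from by omega]
      have hP : ∀ j, 0 ≤ j → j < q + q + q →
          pvPart q 0 0 j = if j < q then 0 else if j < q + q then 1 else 2 := by
        intro j h1 h2
        unfold pvPart
        rw [if_neg (show ¬ j < 0 by omega)]
        by_cases c1 : j < q
        · rw [if_pos c1, pv_fd_val (j - 0) q 0 (by omega) (by omega) (by omega)]
          norm_num
        · by_cases c2 : j < q + q
          · rw [if_neg c1, if_pos c2, pv_fd_val (j - 0) q 1 (by omega) (by omega) (by omega)]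
            norm_num
          · rw [if_neg c1, if_neg c2, pv_fd_val (j - 0) q 2 (by omega) (by omega) (by omega)]
            norm_num
      obtain ⟨e0, e1, e2⟩ := pv_filter_of_classify (pvPart q 0 0) q (q + q) (q + q + q)
        (by omega) (by omega) (by omega) hP
      rw [e0, e1, e2]
      exact ⟨rfl, rfl, rfl⟩
    · rw [PySem.List.pyRange_one_eq_nil (show q ≤ (0:Int) by omega),
          PySem.List.pyRange_one_eq_nil (show q + q ≤ q by omega),
          PySem.List.pyRange_one_eq_nil (show q + q + q ≤ q + q by omega),
          PySem.List.pyRange_one_eq_nil (show n ≤ (0:Int) by omega)]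
      simp
  -- r = 1
  · by_cases hq0 : 0 ≤ q
    · rw [show n = q + 1 + q + q from by omega]
      have hP : ∀ j, 0 ≤ j → j < q + 1 + q + q →
          pvPart q 1 (q + 1) j = if j < q + 1 then 0 else if j < q + 1 + q then 1 else 2 := by
        intro j h1 h2
        unfold pvPart
        by_cases c1 : j < q + 1
        · rw [if_pos c1, if_pos c1, pv_fd_val j (q + 1) 0 (by omega) (by omega) (by omega)]
        · by_cases c2 : j < q + 1 + q
          · rw [if_neg c1, if_neg c1, if_pos c2,
                pv_fd_val (j - (q + 1)) q 0 (by omega) (by omega) (by omega)]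
            norm_num
          · rw [if_neg c1, if_neg c1, if_neg c2,
                pv_fd_val (j - (q + 1)) q 1 (by omega) (by omega) (by omega)]
            norm_num
      obtain ⟨e0, e1, e2⟩ := pv_filter_of_classify (pvPart q 1 (q + 1)) (q + 1) (q + 1 + q)
        (q + 1 + q + q) (by omega) (by omega) (by omega) hP
      rw [e0, e1, e2]
      exact ⟨rfl, rfl, rfl⟩
    · rw [PySem.List.pyRange_one_eq_nil (show q + 1 ≤ (0:Int) by omega),
          PySem.List.pyRange_one_eq_nil (show q + 1 + q ≤ q + 1 by omega),
          PySem.List.pyRange_one_eq_nil (show q + 1 + q + q ≤ q + 1 + q by omega),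
          PySem.List.pyRange_one_eq_nil (show n ≤ (0:Int) by omega)]
      simp
  -- r = 2
  · by_cases hq0 : 0 ≤ q
    · rw [show n = q + 1 + q + 1 + q from by omega]
      have hP : ∀ j, 0 ≤ j → j < q + 1 + q + 1 + q →
          pvPart q 2 (2 * (q + 1)) j =
            if j < q + 1 then 0 else if j < q + 1 + q + 1 then 1 else 2 := by
        intro j h1 h2
        unfold pvPart
        by_cases c1 : j < q + 1
        · rw [if_pos (show j < 2 * (q + 1) by omega), if_pos c1,
              pv_fd_val j (q + 1) 0 (by omega) (by omega) (by omega)]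
        · by_cases c2 : j < q + 1 + q + 1
          · rw [if_pos (show j < 2 * (q + 1) by omega), if_neg c1, if_pos c2,
                pv_fd_val j (q + 1) 1 (by omega) (by omega) (by omega)]
          · rw [if_neg (show ¬ j < 2 * (q + 1) by omega), if_neg c1, if_neg c2,
                pv_fd_val (j - 2 * (q + 1)) q 0 (by omega) (by omega) (by omega)]
            norm_num
      obtain ⟨e0, e1, e2⟩ := pv_filter_of_classify (pvPart q 2 (2 * (q + 1))) (q + 1)
        (q + 1 + q + 1) (q + 1 + q + 1 + q) (by omega) (by omega) (by omega) hP
      rw [e0, e1, e2]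
      exact ⟨rfl, rfl, rfl⟩
    · rw [PySem.List.pyRange_one_eq_nil (show q + 1 ≤ (0:Int) by omega),
          PySem.List.pyRange_one_eq_nil (show q + 1 + q + 1 ≤ q + 1 by omega),
          PySem.List.pyRange_one_eq_nil (show q + 1 + q + 1 + q ≤ q + 1 + q + 1 by omega),
          PySem.List.pyRange_one_eq_nil (show n ≤ (0:Int) by omega)]
      simp

-- ===== VERDICT (by name: the statement is the Claim_ definition above) =====
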